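-- pv_equiv track=rewrite | github.com/Magnus-Fjeldstad/advent-of-code | 2025/day4/day4.py | check_adjacent_new
-- ===== SOURCE A (Python) =====
-- def check_adjacent_new(pallet):
--     pallet = [list(row) for row in pallet]
--     h = len(pallet)
--     w = len(pallet[0])
--     total_sum = 0
--
--     while True:
--         remove_list = []
--
--         for i in range(h):
--             for j in range(w):
--                 if pallet[i][j] != "@":
--                     continue
--
--                 neighbors = []
--
--                 # Right
--                 if j + 1 < w and pallet[i][j + 1]:
--                     neighbors.append(pallet[i][j + 1])
--                 # Left
--                 if j - 1 >= 0 and pallet[i][j - 1]: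
--                     neighbors.append(pallet[i][j - 1])
--                 # Up
--                 if i - 1 >= 0 and pallet[i - 1][j]:
--                     neighbors.append(pallet[i - 1][j])
--                 # Down
--                 if i + 1 < h and pallet[i + 1][j]:
--                     neighbors.append(pallet[i + 1][j])
--                 # Left Up
--                 if i - 1 >= 0 and j - 1 >= 0 and pallet[i - 1][j - 1]:
--                     neighbors.append(pallet[i - 1][j - 1])
--                 # Left Down
--                 if i + 1 < h and j - 1 >= 0 and pallet[i + 1][j - 1]:
--                     neighbors.append(pallet[i + 1][j - 1])
--                 # Right Up
--                 if i - 1 >= 0 and j + 1 < w and pallet[i - 1][j + 1]: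
--                     neighbors.append(pallet[i - 1][j + 1])
--                 # Right Down
--                 if i + 1 < h and j + 1 < w and pallet[i + 1][j + 1]:
--                     neighbors.append(pallet[i + 1][j + 1])
--
--                 if neighbors.count("@") < 4:
--                     remove_list.append((i, j))
--
--         if not remove_list:
--             return total_sum
--
--         for x, y in remove_list:
--             pallet[x][y] = "."
--             total_sum += 1
-- ===== SOURCE B (Python) =====
-- NBRS = [(0, 1), (0, -1), (-1, 0), (1, 0), (-1, -1), (1, -1), (-1, 1), (1, 1)]
--
--
-- def _deg(cells, p):
--     return sum((p[0] + di, p[1] + dj) in cells for di, dj in NBRS)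
--
--
-- def check_adjacent_new(pallet):
--     # Worklist peeling (4-core): remove deficient cells one at a time,
--     # re-examining only the neighbors of each removed cell.
--     w = len(pallet[0])
--     cur = {(i, j)
--            for i, row in enumerate(pallet)
--            for j, c in enumerate(row[:w]) if c == "@"}
--     start = len(cur)
--     stack = [p for p in cur if _deg(cur, p) < 4]
--     while stack:
--         p = stack.pop()
--         if p not in cur:
--             continue
--         cur.remove(p)
--         for di, dj in NBRS:
--             q = (p[0] + di, p[1] + dj)
--             if q in cur and _deg(cur, q) < 4:
--                 stack.append(q)
--     return start - len(cur)
-- ===== Notes on version B (the rewrite author's own statement) =====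
-- stated objective: faster
-- what changed: B replaces A's synchronous rounds of full-grid rescans (rescan every cell, collect a removal batch, mutate, repeat until stable) by one-pass worklist peeling of the 4-core: deficient '@' cells are removed one at a time from a stack and only the 8 neighbors of each removed cell are re-examined, so the count of removals is the initial live count minus the size of the unique maximal subset where every cell keeps >=4 live neighbors.
import Mathlib
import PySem

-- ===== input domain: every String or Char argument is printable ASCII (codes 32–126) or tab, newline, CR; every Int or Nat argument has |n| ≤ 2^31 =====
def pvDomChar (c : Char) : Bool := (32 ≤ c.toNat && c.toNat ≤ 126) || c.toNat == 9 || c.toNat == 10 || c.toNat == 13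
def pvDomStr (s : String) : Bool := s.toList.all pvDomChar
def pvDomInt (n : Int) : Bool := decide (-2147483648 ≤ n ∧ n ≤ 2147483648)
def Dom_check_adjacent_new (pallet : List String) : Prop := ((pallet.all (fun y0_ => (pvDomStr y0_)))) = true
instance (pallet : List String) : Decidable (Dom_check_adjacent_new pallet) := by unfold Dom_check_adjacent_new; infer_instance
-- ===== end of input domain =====

-- B replaces A's repeated synchronous full-grid rescans by one-at-a-time worklist peeling (the 4-core
-- of the '@' cells): only neighbors of a removed cell are re-examined; objective 'faster' (measured)
-- (return value only; A's mutation of a local copy is not observable).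

-- ===== PORT A =====
-- pallet[i][j] for the nested char lists; guards in A keep every used index in range (under Pre_),
-- so the default ' ' is never read there.
def aGet (g : List (List Char)) (i j : Int) : Char :=
  PySem.List.pyGetD (PySem.List.pyGetD g i []) j ' '

-- the eight guarded neighbour reads, in A's order (Right, Left, Up, Down, LU, LD, RU, RD);
-- the Python truthiness test 'and pallet[..][..]' is always true (each cell is a 1-char string).
def aNbrs (g : List (List Char)) (h w i j : Int) : List Char :=
  (if j + 1 < w then [aGet g i (j + 1)] else []) ++
  (if 0 ≤ j - 1 then [aGet g i (j - 1)] else []) ++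
  (if 0 ≤ i - 1 then [aGet g (i - 1) j] else []) ++
  (if i + 1 < h then [aGet g (i + 1) j] else []) ++
  (if 0 ≤ i - 1 ∧ 0 ≤ j - 1 then [aGet g (i - 1) (j - 1)] else []) ++
  (if i + 1 < h ∧ 0 ≤ j - 1 then [aGet g (i + 1) (j - 1)] else []) ++
  (if 0 ≤ i - 1 ∧ j + 1 < w then [aGet g (i - 1) (j + 1)] else []) ++
  (if i + 1 < h ∧ j + 1 < w then [aGet g (i + 1) (j + 1)] else [])

-- the double scan building remove_list
def aRemoveList (g : List (List Char)) (h w : Int) : List (Int × Int) :=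
  (PySem.List.pyRange 0 h 1).foldl (fun acc i =>
    (PySem.List.pyRange 0 w 1).foldl (fun acc j =>
      if aGet g i j ≠ '@' then acc
      else if PySem.List.count (aNbrs g h w i j) '@' < 4 then acc ++ [(i, j)]
      else acc) acc) []

-- pallet[x][y] = "." ; remove_list entries are in range (toNat exact: pyRange indices are ≥ 0)
def aSetCell (g : List (List Char)) (x y : Int) : List (List Char) :=
  g.set x.toNat ((g.getD x.toNat []).set y.toNat '.')

-- the 'while True' loop; it always terminates in Python (each non-returning round blanks ≥ 1 cell),
-- and fuel h*w+1 covers every possible round, so the 0-fuel branch is never reached from check_adjacent_new.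
def aLoop (h w : Int) : Nat → List (List Char) → Int → Int
  | 0, _, tot => tot
  | fuel + 1, g, tot =>
    let rl := aRemoveList g h w
    if rl.isEmpty then tot
    else
      let st := rl.foldl (fun st p => (aSetCell st.1 p.1 p.2, st.2 + 1)) (g, tot)
      aLoop h w fuel st.1 st.2

def check_adjacent_new (pallet : List String) : Int :=
  let g := pallet.map (fun row => row.toList)
  let h : Int := g.length
  let w : Int := PySem.Str.len (pallet.headD "")   -- pallet[0]: IndexError on [], excluded by Pre_
  aLoop h w ((h * w).toNat + 1) g 0

-- ===== PORT B =====
def bDirs : List (Int × Int) :=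
  [(0, 1), (0, -1), (-1, 0), (1, 0), (-1, -1), (1, -1), (-1, 1), (1, 1)]

-- _deg(cells, p) = sum(neighbour in cells for d in NBRS)
def bDeg (cells : List (Int × Int)) (p : Int × Int) : Nat :=
  bDirs.countP (fun d => decide ((p.1 + d.1, p.2 + d.2) ∈ cells))

-- {(i, j) for i, row in enumerate(pallet) for j, c in enumerate(row[:w]) if c == "@"}, pre-dedup
-- (row[:w] = take w since 0 ≤ w)
def bLive (pallet : List String) (w : Int) : List (Int × Int) :=
  (PySem.List.enumerate pallet 0).flatMap (fun ir =>
    ((PySem.List.enumerate (ir.2.toList.take w.toNat) 0).filter (fun jc => jc.2 == '@')).map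
      (fun jc => (ir.1, jc.1)))

-- the 'while stack' worklist loop; stack.pop() pops from the end; cur.remove(p) after the
-- 'p not in cur' check is List.erase (exact: PySem.Set.remove?_eq_some_erase). Python's loop
-- terminates; the fuel passed below covers every iteration (proved below), so the 0-fuel
-- branch is never reached from check_adjacent_new_alt.
def bQueue : Nat → List (Int × Int) → List (Int × Int) → List (Int × Int)
  | 0, _, cur => cur
  | fuel + 1, stack, cur =>
    match stack.getLast? with
    | none => cur
    | some p =>
      let stack' := stack.dropLast
      if p ∈ cur then
        let cur' := cur.erase p
        let adds := (bDirs.map (fun d => (p.1 + d.1, p.2 + d.2))).filter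
          (fun q => decide (q ∈ cur') && decide (bDeg cur' q < 4))
        bQueue fuel (stack' ++ adds) cur'
      else bQueue fuel stack' cur

def check_adjacent_new_alt (pallet : List String) : Int :=
  let w := PySem.Str.len (pallet.headD "")   -- len(pallet[0]): IndexError on [], excluded by Pre_
  let cur := PySem.List.dedup (bLive pallet w)   -- the set comprehension
  let start := cur.length
  let stack := cur.filter (fun p => decide (bDeg cur p < 4))
  (start : Int) - (bQueue (stack.length + 9 * start + 1) stack cur).length

-- ===== PRECONDITION & SPEC =====
-- Pre_ = exactly where the Python A returns: a non-empty pallet whose rows are all at least as long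
-- as row 0 (a row shorter than row 0 is indexed past its end by A's scan → IndexError; [] → IndexError).
def Pre_check_adjacent_new (pallet : List String) : Prop :=
  pallet ≠ [] ∧ ∀ s ∈ pallet, PySem.Str.len (pallet.headD "") ≤ PySem.Str.len s
instance (pallet : List String) : Decidable (Pre_check_adjacent_new pallet) := by
  unfold Pre_check_adjacent_new; infer_instance

def pvWitness_check_adjacent_new : List String := ["@@", "@@"]

def Spec_check_adjacent_new (pallet : List String) (out : Int) : Prop := out = check_adjacent_new_alt pallet
instance (pallet : List String) (out : Int) : Decidable (Spec_check_adjacent_new pallet out) := by unfold Spec_check_adjacent_new; infer_instance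

-- ===== CLAIM (what is proved, stated in full; the proofs are below) =====
def Claim_equal_check_adjacent_new : Prop := ∀ (pallet : List String), Dom_check_adjacent_new pallet → Pre_check_adjacent_new pallet → Spec_check_adjacent_new pallet (check_adjacent_new pallet)

-- ===== LEMMAS AND PROOFS =====

-- The bridge: both programs compute |initial '@' cells| minus |the 4-core| (the unique maximal
-- subset of the '@' cells in which every cell has ≥ 4 of its 8 neighbours). A reaches the core by
-- synchronous rounds (sStep/sLoop below characterise A's loop); B reaches it by worklist peeling.

-- row-major list of all coordinates of the h×w rectangle
def rowMajor (h w : Int) : List (Int × Int) :=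
  (PySem.List.pyRange 0 h 1).flatMap (fun i => (PySem.List.pyRange 0 w 1).map (fun j => (i, j)))

-- the coordinates holding '@' in g, in row-major order
def liveOf (g : List (List Char)) (h w : Int) : List (Int × Int) :=
  (rowMajor h w).filter (fun p => aGet g p.1 p.2 == '@')

-- one synchronous round (keep the cells of degree ≥ 4), and A's loop seen on coordinate sets
def sStep (live : List (Int × Int)) : List (Int × Int) :=
  live.filter (fun p => 4 ≤ bDeg live p)

def sLoop : Nat → List (Int × Int) → List (Int × Int)
  | 0, live => live
  | fuel + 1, live =>
    let surv := sStep live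
    if surv.length = live.length then live else sLoop fuel surv

-- shape invariant carried through the rounds
def Shp (g : List (List Char)) (h w : Int) : Prop :=
  (g.length : Int) = h ∧ 0 ≤ w ∧ ∀ row ∈ g, w ≤ (row.length : Int)

theorem mem_rowMajor (h w : Int) (p : Int × Int) :
    p ∈ rowMajor h w ↔ 0 ≤ p.1 ∧ p.1 < h ∧ 0 ≤ p.2 ∧ p.2 < w := by
  obtain ⟨i, j⟩ := p
  simp [rowMajor, List.mem_flatMap, PySem.List.mem_pyRange_one]
  tauto

theorem mem_liveOf (g : List (List Char)) (h w : Int) (p : Int × Int) :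
    p ∈ liveOf g h w ↔ 0 ≤ p.1 ∧ p.1 < h ∧ 0 ≤ p.2 ∧ p.2 < w ∧ aGet g p.1 p.2 = '@' := by
  rw [liveOf, List.mem_filter]
  simp only [mem_rowMajor, beq_iff_eq]
  tauto

theorem bLive_eq_liveOf (pallet : List String) (w : Int) (hw : 0 ≤ w)
    (hrow : ∀ s ∈ pallet, w ≤ (s.toList.length : Int)) :
    bLive pallet w = liveOf (pallet.map (fun row => row.toList)) pallet.length w := by
  rw [bLive, liveOf, rowMajor, List.filter_flatMap,
    PySem.List.enumerate_eq_map_pyRange pallet "", List.flatMap_map]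
  have hlen : PySem.List.len pallet = (pallet.length : Int) := by simp [pysem]
  rw [hlen]
  refine List.flatMap_congr ?_
  intro i hi
  simp only [PySem.List.mem_pyRange_one] at hi
  have hig : i.toNat < pallet.length := by omega
  rw [PySem.List.pyGetD_eq_getElem pallet "" hi.1 (by omega)]
  simp only
  have hwr : w ≤ ((pallet[i.toNat]).toList.length : Int) :=
    hrow _ (List.getElem_mem hig)
  have htk : ((pallet[i.toNat]).toList.take w.toNat).length = w.toNat := by
    rw [List.length_take]; omega
  rw [PySem.List.enumerate_eq_map_pyRange _ ' ',
    show PySem.List.len ((pallet[i.toNat]).toList.take w.toNat) = w by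
      simp [pysem, htk]; omega,
    List.filter_map, List.map_map, List.filter_map]
  have hmapf : ((fun jc => (i, jc.1)) ∘ fun j => ((j : Int), PySem.List.pyGetD ((pallet[i.toNat]).toList.take w.toNat) j ' '))
      = ((fun j => (i, j)) : Int → Int × Int) := by
    funext j; rfl
  rw [hmapf]
  congr 1
  refine List.filter_congr ?_
  intro j hj
  simp only [PySem.List.mem_pyRange_one] at hj
  have hjt : j.toNat < ((pallet[i.toNat]).toList.take w.toNat).length := by omega
  have hjr : j.toNat < (pallet[i.toNat]).toList.length := by omega
  simp only [Function.comp_apply]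
  rw [PySem.List.pyGetD_eq_getElem _ ' ' hj.1 (by omega), List.getElem_take]
  rw [aGet, PySem.List.pyGetD_eq_getElem _ [] hi.1 (by simp; omega), List.getElem_map,
    PySem.List.pyGetD_eq_getElem _ ' ' hj.1 (by omega)]

theorem count_eq_deg (g : List (List Char)) (h w : Int) (i j : Int)
    (hi : 0 ≤ i) (hih : i < h) (hj : 0 ≤ j) (hjw : j < w) :
    PySem.List.count (aNbrs g h w i j) '@' = bDeg (liveOf g h w) (i, j) := by
  have cnt1 : ∀ (P : Prop) [Decidable P] (c : Char),
      List.count '@' (if P then [c] else []) = if P ∧ c = '@' then 1 else 0 := by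
    intro P _ c
    by_cases hp : P
    · by_cases hc : c = '@' <;> simp [hp, hc]
    · simp [hp]
  have eR : ∀ C : Prop, (0 ≤ i ∧ i < h ∧ 0 ≤ j + 1 ∧ j + 1 < w ∧ C) ↔ (j + 1 < w ∧ C) := by
    intro C; constructor
    · rintro ⟨_, _, _, h4, c⟩; exact ⟨h4, c⟩
    · rintro ⟨h4, c⟩; exact ⟨hi, hih, by omega, h4, c⟩
  have eL : ∀ C : Prop, (0 ≤ i ∧ i < h ∧ 0 ≤ j - 1 ∧ j - 1 < w ∧ C) ↔ (0 ≤ j - 1 ∧ C) := by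
    intro C; constructor
    · rintro ⟨_, _, h3, _, c⟩; exact ⟨h3, c⟩
    · rintro ⟨h3, c⟩; exact ⟨hi, hih, h3, by omega, c⟩
  have eU : ∀ C : Prop, (0 ≤ i - 1 ∧ i - 1 < h ∧ 0 ≤ j ∧ j < w ∧ C) ↔ (0 ≤ i - 1 ∧ C) := by
    intro C; constructor
    · rintro ⟨h1, _, _, _, c⟩; exact ⟨h1, c⟩
    · rintro ⟨h1, c⟩; exact ⟨h1, by omega, hj, hjw, c⟩
  have eD : ∀ C : Prop, (0 ≤ i + 1 ∧ i + 1 < h ∧ 0 ≤ j ∧ j < w ∧ C) ↔ (i + 1 < h ∧ C) := by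
    intro C; constructor
    · rintro ⟨_, h2, _, _, c⟩; exact ⟨h2, c⟩
    · rintro ⟨h2, c⟩; exact ⟨by omega, h2, hj, hjw, c⟩
  have eLU : ∀ C : Prop, (0 ≤ i - 1 ∧ i - 1 < h ∧ 0 ≤ j - 1 ∧ j - 1 < w ∧ C) ↔ ((0 ≤ i - 1 ∧ 0 ≤ j - 1) ∧ C) := by
    intro C; constructor
    · rintro ⟨h1, _, h3, _, c⟩; exact ⟨⟨h1, h3⟩, c⟩
    · rintro ⟨⟨h1, h3⟩, c⟩; exact ⟨h1, by omega, h3, by omega, c⟩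
  have eLD : ∀ C : Prop, (0 ≤ i + 1 ∧ i + 1 < h ∧ 0 ≤ j - 1 ∧ j - 1 < w ∧ C) ↔ ((i + 1 < h ∧ 0 ≤ j - 1) ∧ C) := by
    intro C; constructor
    · rintro ⟨_, h2, h3, _, c⟩; exact ⟨⟨h2, h3⟩, c⟩
    · rintro ⟨⟨h2, h3⟩, c⟩; exact ⟨by omega, h2, h3, by omega, c⟩
  have eRU : ∀ C : Prop, (0 ≤ i - 1 ∧ i - 1 < h ∧ 0 ≤ j + 1 ∧ j + 1 < w ∧ C) ↔ ((0 ≤ i - 1 ∧ j + 1 < w) ∧ C) := by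
    intro C; constructor
    · rintro ⟨h1, _, _, h4, c⟩; exact ⟨⟨h1, h4⟩, c⟩
    · rintro ⟨⟨h1, h4⟩, c⟩; exact ⟨h1, by omega, by omega, h4, c⟩
  have eRD : ∀ C : Prop, (0 ≤ i + 1 ∧ i + 1 < h ∧ 0 ≤ j + 1 ∧ j + 1 < w ∧ C) ↔ ((i + 1 < h ∧ j + 1 < w) ∧ C) := by
    intro C; constructor
    · rintro ⟨_, h2, _, h4, c⟩; exact ⟨⟨h2, h4⟩, c⟩
    · rintro ⟨⟨h2, h4⟩, c⟩; exact ⟨by omega, h2, by omega, h4, c⟩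
  simp only [aNbrs, PySem.List.count_eq, List.count_append, cnt1, bDeg, bDirs, List.countP_cons,
    List.countP_nil, decide_eq_true_eq, mem_liveOf, add_zero, ← sub_eq_add_neg]
  simp only [eR, eL, eU, eD, eLU, eLD, eRU, eRD]
  ring

theorem removeList_eq_filter (g : List (List Char)) (h w : Int) :
    aRemoveList g h w = (liveOf g h w).filter (fun p => decide (PySem.List.count (aNbrs g h w p.1 p.2) '@' < 4)) := by
  have hfun : ∀ i : Int, (fun (acc : List (Int × Int)) j =>
        if aGet g i j ≠ '@' then acc
        else if PySem.List.count (aNbrs g h w i j) '@' < 4 then acc ++ [(i, j)] else acc)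
      = (fun acc j =>
        if aGet g i j = '@' ∧ PySem.List.count (aNbrs g h w i j) '@' < 4 then acc ++ [(i, j)] else acc) := by
    intro i; funext acc j
    by_cases h1 : aGet g i j = '@' <;> by_cases h2 : PySem.List.count (aNbrs g h w i j) '@' < 4 <;>
      simp [h1]
  have houter : (fun (acc : List (Int × Int)) (i : Int) => (PySem.List.pyRange 0 w 1).foldl (fun acc j =>
        if aGet g i j ≠ '@' then acc
        else if PySem.List.count (aNbrs g h w i j) '@' < 4 then acc ++ [(i, j)] else acc) acc)
      = (fun acc i => acc ++ ((PySem.List.pyRange 0 w 1).filter (fun j =>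
          decide (aGet g i j = '@' ∧ PySem.List.count (aNbrs g h w i j) '@' < 4))).map (fun j => (i, j))) := by
    funext acc i
    rw [hfun i, PySem.List.foldl_append_ite]
  rw [aRemoveList, houter, PySem.List.foldl_append_eq_flatMap, liveOf, rowMajor,
    List.filter_filter, List.filter_flatMap, List.nil_append]
  refine List.flatMap_congr ?_   -- pointwise over the rows
  intro i _
  rw [List.filter_map]
  refine congrArg _ (List.filter_congr ?_)
  intro j _
  simp only [Function.comp_apply, Bool.decide_and]
  rw [Bool.and_comm, Bool.beq_eq_decide_eq]

theorem aGet_setCell (g : List (List Char)) (h w x y i j : Int)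
    (hs : Shp g h w)
    (hx : 0 ≤ x) (hxh : x < h) (hy : 0 ≤ y) (hyw : y < w)
    (hi : 0 ≤ i) (hih : i < h) (hj : 0 ≤ j) (hjw : j < w) :
    aGet (aSetCell g x y) i j = if i = x ∧ j = y then '.' else aGet g i j := by
  obtain ⟨hl, hw0, hrow⟩ := hs
  have hxg : x.toNat < g.length := by omega
  have hig : i.toNat < g.length := by omega
  have hwx : w ≤ ((g[x.toNat]).length : Int) := hrow _ (List.getElem_mem hxg)
  have hwi : w ≤ ((g[i.toNat]).length : Int) := hrow _ (List.getElem_mem hig)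
  rw [aSetCell, aGet, aGet, List.getD_eq_getElem g [] hxg,
    PySem.List.pyGetD_eq_getElem _ [] hi (by rw [List.length_set]; omega),
    PySem.List.pyGetD_eq_getElem g [] hi (by omega),
    List.getElem_set]
  by_cases hix : x.toNat = i.toNat
  · rw [if_pos hix]
    have hix' : i = x := by omega
    rw [PySem.List.pyGetD_eq_getElem _ ' ' hj (by rw [List.length_set]; omega),
      PySem.List.pyGetD_eq_getElem _ ' ' hj (by omega),
      List.getElem_set]
    by_cases hjy : y.toNat = j.toNat
    · have hjy' : j = y := by omega
      simp [hix', hjy']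
    · have hjy' : ¬(j = y) := by omega
      rw [if_neg hjy, if_neg (by simp [hjy'])]
      simp only [hix]
  · have hix' : ¬(i = x) := by omega
    rw [if_neg hix, if_neg (by simp [hix']),
      PySem.List.pyGetD_eq_getElem _ ' ' hj (by omega)]

theorem Shp_setCell (g : List (List Char)) (h w x y : Int) (hs : Shp g h w)
    (hx : 0 ≤ x) (hxh : x < h) : Shp (aSetCell g x y) h w := by
  obtain ⟨hl, hw0, hrow⟩ := hs
  have hxg : x.toNat < g.length := by omega
  refine ⟨by simpa [aSetCell, List.length_set] using hl, hw0, ?_⟩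
  intro row hr
  rcases List.mem_or_eq_of_mem_set hr with hmem | rfl
  · exact hrow _ hmem
  · rw [List.length_set, List.getD_eq_getElem g [] hxg]
    exact hrow _ (List.getElem_mem hxg)

theorem aGet_foldSet (h w : Int) (rl : List (Int × Int)) :
    ∀ (g : List (List Char)), Shp g h w →
    (∀ p ∈ rl, 0 ≤ p.1 ∧ p.1 < h ∧ 0 ≤ p.2 ∧ p.2 < w) →
    ∀ i j : Int, 0 ≤ i → i < h → 0 ≤ j → j < w →
    aGet (rl.foldl (fun g p => aSetCell g p.1 p.2) g) i j
      = if (i, j) ∈ rl then '.' else aGet g i j := by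
  induction rl with
  | nil => intro g _ _ i j _ _ _ _; simp
  | cons p rl ih =>
    intro g hs hb i j hi hih hj hjw
    have hp := hb p (List.mem_cons_self ..)
    rw [List.foldl_cons,
      ih (aSetCell g p.1 p.2) (Shp_setCell g h w p.1 p.2 hs hp.1 hp.2.1)
        (fun q hq => hb q (List.mem_cons_of_mem _ hq)) i j hi hih hj hjw,
      aGet_setCell g h w p.1 p.2 i j ⟨hs.1, hs.2.1, hs.2.2⟩
        hp.1 hp.2.1 hp.2.2.1 hp.2.2.2 hi hih hj hjw]
    by_cases hmem : (i, j) ∈ rl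
    · simp [hmem]
    · rw [if_neg hmem]
      by_cases hpe : i = p.1 ∧ j = p.2
      · rw [if_pos hpe, if_pos (by rw [List.mem_cons]; exact Or.inl (Prod.ext_iff.mpr hpe))]
      · rw [if_neg hpe, if_neg (by
          rw [List.mem_cons]
          rintro (hc | hc)
          · exact hpe (Prod.ext_iff.mp hc)
          · exact hmem hc)]

theorem Shp_foldSet (h w : Int) (rl : List (Int × Int)) :
    ∀ (g : List (List Char)), Shp g h w →
    (∀ p ∈ rl, 0 ≤ p.1 ∧ p.1 < h ∧ 0 ≤ p.2 ∧ p.2 < w) →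
    Shp (rl.foldl (fun g p => aSetCell g p.1 p.2) g) h w := by
  induction rl with
  | nil => intro g hs _; simpa using hs
  | cons p rl ih =>
    intro g hs hb
    have hp := hb p (List.mem_cons_self ..)
    exact ih _ (Shp_setCell g h w p.1 p.2 hs hp.1 hp.2.1)
      (fun q hq => hb q (List.mem_cons_of_mem _ hq))

theorem rl_bounds (g : List (List Char)) (h w : Int) :
    ∀ p ∈ aRemoveList g h w, 0 ≤ p.1 ∧ p.1 < h ∧ 0 ≤ p.2 ∧ p.2 < w := by
  intro p hp
  rw [removeList_eq_filter] at hp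
  have := (mem_liveOf g h w p).1 (List.mem_of_mem_filter hp)
  exact ⟨this.1, this.2.1, this.2.2.1, this.2.2.2.1⟩

theorem roundEq (g : List (List Char)) (h w : Int) (hs : Shp g h w) :
    liveOf ((aRemoveList g h w).foldl (fun g p => aSetCell g p.1 p.2) g) h w
      = sStep (liveOf g h w) := by
  rw [sStep]
  set D := bDeg (liveOf g h w) with hD
  rw [liveOf, liveOf, List.filter_filter]
  refine List.filter_congr ?_
  intro p hp
  obtain ⟨i, j⟩ := p
  have hb := (mem_rowMajor h w (i, j)).1 hp
  rw [aGet_foldSet h w _ g hs (rl_bounds g h w) i j hb.1 hb.2.1 hb.2.2.1 hb.2.2.2]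
  by_cases hmem : (i, j) ∈ aRemoveList g h w
  · -- removed this round: the new cell is '.', and the old degree was < 4
    have hm : PySem.List.count (aNbrs g h w i j) '@' < 4 := by
      rw [removeList_eq_filter] at hmem
      simpa using List.of_mem_filter hmem
    have hdeg : D (i, j) < 4 := by
      rw [hD, ← count_eq_deg g h w i j hb.1 hb.2.1 hb.2.2.1 hb.2.2.2]
      simpa using hm
    simp [hmem, Nat.not_le.mpr hdeg]
  · by_cases hch : aGet g i j = '@'
    · have hlv : (i, j) ∈ liveOf g h w := by
        rw [mem_liveOf]; exact ⟨hb.1, hb.2.1, hb.2.2.1, hb.2.2.2, hch⟩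
      have hdeg : 4 ≤ PySem.List.count (aNbrs g h w i j) '@' := by
        by_contra hc
        exact hmem (by
          rw [removeList_eq_filter, List.mem_filter]
          exact ⟨hlv, by simpa using Nat.lt_of_not_le hc⟩)
      have hdeg' : 4 ≤ D (i, j) := by
        rw [hD, ← count_eq_deg g h w i j hb.1 hb.2.1 hb.2.2.1 hb.2.2.2]
        simpa using hdeg
      simp [hmem, hch, hdeg']
    · simp [hmem, hch]

theorem rl_length (g : List (List Char)) (h w : Int) :
    (aRemoveList g h w).length + (sStep (liveOf g h w)).length = (liveOf g h w).length := by
  rw [removeList_eq_filter, sStep]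
  have hcongr : (liveOf g h w).filter (fun p => decide (PySem.List.count (aNbrs g h w p.1 p.2) '@' < 4))
      = (liveOf g h w).filter (fun p => !decide (4 ≤ bDeg (liveOf g h w) p)) := by
    refine List.filter_congr ?_
    intro p hp
    have hb := (mem_liveOf g h w p).1 hp
    have hcd : PySem.List.count (aNbrs g h w p.1 p.2) '@' = bDeg (liveOf g h w) p := by
      have := count_eq_deg g h w p.1 p.2 hb.1 hb.2.1 hb.2.2.1 hb.2.2.2.1
      simpa using this
    rw [hcd]
    simp [← decide_not]
  rw [hcongr, Nat.add_comm]
  exact Eq.symm (List.length_eq_length_filter_add _)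

theorem main_loop (h w : Int) : ∀ (fA fB : Nat) (g : List (List Char)) (tot : Int),
    Shp g h w →
    (liveOf g h w).length < fA → (liveOf g h w).length < fB →
    aLoop h w fA g tot = tot + ((liveOf g h w).length : Int) - ((sLoop fB (liveOf g h w)).length : Int) := by
  intro fA
  induction fA with
  | zero => intro fB g tot _ hfa _; omega
  | succ fA ih =>
    intro fB g tot hs hfa hfb
    obtain ⟨fB', rfl⟩ : ∃ fB', fB = fB' + 1 := ⟨fB - 1, by omega⟩
    have hstep := rl_length g h w
    have hround := roundEq g h w hs
    by_cases hempty : (aRemoveList g h w).isEmpty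
    · have hrl0 : (aRemoveList g h w).length = 0 := by
        simpa [List.isEmpty_iff] using hempty
      have hsl : (sStep (liveOf g h w)).length = (liveOf g h w).length := by omega
      rw [aLoop, sLoop]
      simp only [hempty, hsl, if_pos]
      omega
    · have hrlpos : 0 < (aRemoveList g h w).length := by
        cases hh : aRemoveList g h w with
        | nil => rw [hh] at hempty; simp at hempty
        | cons a t => simp
      have hsne : ¬((sStep (liveOf g h w)).length = (liveOf g h w).length) := by omega
      have hfold : (aRemoveList g h w).foldl (fun st p => (aSetCell st.1 p.1 p.2, st.2 + 1)) (g, tot)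
          = ((aRemoveList g h w).foldl (fun g p => aSetCell g p.1 p.2) g,
             tot + ((aRemoveList g h w).length : Int)) := by
        rw [PySem.List.foldl_prod_mk (fun g p => aSetCell g p.1 p.2)
          (fun (t : Int) (p : Int × Int) => t + 1) (aRemoveList g h w) g tot]
        congr 1
        rw [show (fun (t : Int) (p : Int × Int) => t + 1)
            = (fun (acc : Int) (x : Int × Int) => acc + (fun _ => (1 : Int)) x) from rfl,
          PySem.List.foldl_add]
        simp
      have hs' : Shp ((aRemoveList g h w).foldl (fun g p => aSetCell g p.1 p.2) g) h w :=
        Shp_foldSet h w _ g hs (rl_bounds g h w)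
      have ihap := ih fB' ((aRemoveList g h w).foldl (fun g p => aSetCell g p.1 p.2) g)
        (tot + ((aRemoveList g h w).length : Int)) hs'
        (by rw [hround]; omega) (by rw [hround]; omega)
      rw [hround] at ihap
      rw [aLoop, sLoop]
      simp only [hempty, if_false, hsne, hfold, Bool.false_eq_true]
      rw [ihap]
      omega

theorem foldl_add_of_nodup {α : Type} [BEq α] [LawfulBEq α] :
    ∀ (xs s : List α), xs.Nodup → (∀ x ∈ xs, x ∉ s) → xs.foldl PySem.Set.add s = s ++ xs := by
  intro xs
  induction xs with
  | nil => intro s _ _; simp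
  | cons x t ih =>
    intro s hnd hnin
    rw [List.foldl_cons, show PySem.Set.add s x = s ++ [x] by
      simp only [PySem.Set.add, PySem.Set.contains, List.contains_iff_mem]
      exact if_neg (hnin x (List.mem_cons_self ..)),
      ih (s ++ [x]) (List.Nodup.of_cons hnd) (by
        intro y hy
        simp only [List.mem_append, List.mem_singleton, not_or]
        exact ⟨hnin y (List.mem_cons_of_mem _ hy),
          fun hc => (List.nodup_cons.mp hnd).1 (hc ▸ hy)⟩)]
    simp

theorem dedup_eq_self_of_nodup {α : Type} [BEq α] [LawfulBEq α] (xs : List α) (h : xs.Nodup) :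
    PySem.List.dedup xs = xs := by
  rw [PySem.List.dedup, PySem.Set.ofList, foldl_add_of_nodup xs PySem.Set.empty h (by intro x _ hc; simp [PySem.Set.empty] at hc)]
  simp [PySem.Set.empty]

theorem nodup_liveOf (g : List (List Char)) (h w : Int) : (liveOf g h w).Nodup := by
  refine List.Nodup.filter _ ?_
  rw [rowMajor, List.nodup_flatMap]
  constructor
  · intro i _
    exact (PySem.List.nodup_pyRange_one 0 w).map (fun a b hab => by simpa using hab)
  · refine (PySem.List.pairwise_lt_pyRange_one 0 h).imp ?_
    intro a b hab
    rw [Function.onFun, List.disjoint_left]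
    intro p hp hq
    rw [List.mem_map] at hp hq
    obtain ⟨_, _, rfl⟩ := hp
    obtain ⟨_, _, he⟩ := hq
    exact absurd (congrArg Prod.fst he).symm (by simpa using hab.ne)

theorem length_rowMajor (h w : Int) (hh : 0 ≤ h) (hw : 0 ≤ w) :
    (rowMajor h w).length = (h * w).toNat := by
  rw [rowMajor, List.length_flatMap, Int.toNat_mul hh hw]
  have : (fun (a : Int) => ((PySem.List.pyRange 0 w 1).map (fun j => (a, j))).length)
      = fun _ => w.toNat := by
    funext a; simp [PySem.List.length_pyRange_one]
  rw [this, PySem.List.sum_map_const_nat, PySem.List.length_pyRange_one]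
  simp

-- ===== core characterisation: sLoop computes the unique maximal min-degree-4 subset =====

theorem bDeg_mono (S T : List (Int × Int)) (h : S ⊆ T) (p : Int × Int) :
    bDeg S p ≤ bDeg T p := by
  refine List.countP_mono_left ?_
  intro d _ hd
  simp only [decide_eq_true_eq] at hd ⊢
  exact h hd

theorem sLoop_spec : ∀ (fuel : Nat) (L : List (Int × Int)), L.length < fuel → L.Nodup →
    (sLoop fuel L ⊆ L ∧ (sLoop fuel L).Nodup ∧
     (∀ p ∈ sLoop fuel L, 4 ≤ bDeg (sLoop fuel L) p) ∧
     (∀ T : List (Int × Int), T ⊆ L → (∀ p ∈ T, 4 ≤ bDeg T p) → T ⊆ sLoop fuel L)) := by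
  intro fuel
  induction fuel with
  | zero => intro L hf _; omega
  | succ fuel ih =>
    intro L hf hnd
    rw [sLoop]
    by_cases hfix : (sStep L).length = L.length
    · simp only [hfix, if_pos]
      have hall : ∀ p ∈ L, 4 ≤ bDeg L p := by
        have := (List.length_filter_eq_length_iff (l := L)
          (p := fun p => decide (4 ≤ bDeg L p))).1 (by simpa [sStep] using hfix)
        intro p hp; simpa using this p hp
      exact ⟨fun _ hp => hp, hnd, hall, fun T hT _ => hT⟩
    · simp only [hfix, if_neg, if_false]
      have hsub : sStep L ⊆ L := fun x hx => List.mem_of_mem_filter hx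
      have hlt : (sStep L).length < L.length :=
        lt_of_le_of_ne (List.length_filter_le _ _) hfix
      obtain ⟨h1, h2, h3, h4⟩ := ih (sStep L) (by omega) (hnd.filter _)
      refine ⟨fun x hx => hsub (h1 hx), h2, h3, ?_⟩
      intro T hT hTdeg
      refine h4 T ?_ hTdeg
      intro q hq
      rw [sStep, List.mem_filter]
      refine ⟨hT hq, by
        simp only [decide_eq_true_eq]
        exact le_trans (hTdeg q hq) (bDeg_mono T L hT q)⟩

-- the neighbour relation is symmetric: if q + d = p with d ∈ bDirs, then q is one of p's neighbours
theorem nbr_symm (p q : Int × Int) (d : Int × Int) (hd : d ∈ bDirs)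
    (h : (q.1 + d.1, q.2 + d.2) = p) :
    q ∈ bDirs.map (fun d => (p.1 + d.1, p.2 + d.2)) := by
  obtain ⟨a, b⟩ := q
  obtain ⟨x, y⟩ := p
  simp only [Prod.mk.injEq] at h
  fin_cases hd <;> simp_all [bDirs, Prod.ext_iff] <;> omega

-- erasing a non-neighbour does not change the degree
theorem bDeg_erase_of_not_nbr (cur : List (Int × Int)) (p q : Int × Int)
    (h : ∀ d ∈ bDirs, (q.1 + d.1, q.2 + d.2) ≠ p) :
    bDeg (cur.erase p) q = bDeg cur q := by
  refine List.countP_congr ?_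
  intro d hd
  have hiff := List.mem_erase_of_ne (a := (q.1 + d.1, q.2 + d.2)) (b := p) (l := cur) (h d hd)
  simp [hiff]

-- ===== the worklist loop reaches the same core =====

theorem bQueue_spec (F : List (Int × Int)) (hFdeg : ∀ p ∈ F, 4 ≤ bDeg F p) :
    ∀ (fuel : Nat) (stack cur : List (Int × Int)),
    cur.Nodup →
    (∀ q ∈ cur, bDeg cur q < 4 → q ∈ stack) →
    (∀ q ∈ stack, q ∈ cur → bDeg cur q < 4) →
    F ⊆ cur →
    stack.length + 9 * cur.length < fuel →
    (bQueue fuel stack cur ⊆ cur ∧ (bQueue fuel stack cur).Nodup ∧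
     (∀ p ∈ bQueue fuel stack cur, 4 ≤ bDeg (bQueue fuel stack cur) p) ∧
     F ⊆ bQueue fuel stack cur) := by
  intro fuel
  induction fuel with
  | zero => intro stack cur _ _ _ _ hfuel; omega
  | succ fuel ih =>
    intro stack cur hnd hc hd hF hfuel
    rw [bQueue]
    cases hlast : stack.getLast? with
    | none =>
      simp only
      have hse : stack = [] := List.getLast?_eq_none_iff.1 hlast
      refine ⟨fun _ hp => hp, hnd, ?_, hF⟩
      intro p hp
      by_contra hcon
      have := hc p hp (by omega)
      rw [hse] at this
      exact absurd this (List.not_mem_nil)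
    | some p =>
      obtain ⟨s', rfl⟩ : ∃ s', stack = s' ++ [p] := List.getLast?_eq_some_iff.1 hlast
      have hdrop : (s' ++ [p]).dropLast = s' := by
        rw [List.dropLast_concat]
      simp only [hdrop]
      by_cases hmem : p ∈ cur
      · simp only [hmem, if_pos]
        set cur' := cur.erase p with hcur'
        set adds := (bDirs.map (fun d => (p.1 + d.1, p.2 + d.2))).filter
          (fun q => decide (q ∈ cur') && decide (bDeg cur' q < 4)) with hadds
        have hnd' : cur'.Nodup := hnd.erase p
        have hsub' : cur' ⊆ cur := List.erase_subset
        have hpnot : p ∉ cur' := hnd.not_mem_erase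
        have hmemiff : ∀ q : Int × Int, q ∈ cur' ↔ (q ∈ cur ∧ q ≠ p) := by
          intro q
          constructor
          · intro hq; exact ⟨hsub' hq, fun hqe => hpnot (hqe ▸ hq)⟩
          · intro ⟨hq, hne⟩; exact (List.mem_erase_of_ne hne).2 hq
        have hpdeg : bDeg cur p < 4 := hd p (by simp) hmem
        -- F survives this removal
        have hF' : F ⊆ cur' := by
          intro q hq
          rw [hmemiff]
          refine ⟨hF hq, ?_⟩
          rintro rfl
          exact absurd (le_trans (hFdeg q hq) (bDeg_mono F cur hF q)) (by omega)
        -- invariant (c) for the new state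
        have hc' : ∀ q ∈ cur', bDeg cur' q < 4 → q ∈ s' ++ adds := by
          intro q hq hdeg
          rw [List.mem_append]
          by_cases hold : bDeg cur q < 4
          · left
            have := hc q (hsub' hq) hold
            rw [List.mem_append, List.mem_singleton] at this
            rcases this with h' | rfl
            · exact h'
            · exact absurd hq hpnot
          · right
            have hnbr : ¬(∀ d ∈ bDirs, (q.1 + d.1, q.2 + d.2) ≠ p) := by
              intro hall
              rw [bDeg_erase_of_not_nbr cur p q hall] at hdeg
              omega
            push_neg at hnbr
            obtain ⟨d, hdm, hde⟩ := hnbr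
            rw [hadds, List.mem_filter]
            exact ⟨nbr_symm p q d hdm hde, by simp [hq, hdeg]⟩
        -- invariant (d) for the new state
        have hd' : ∀ q ∈ s' ++ adds, q ∈ cur' → bDeg cur' q < 4 := by
          intro q hq hq'
          rw [List.mem_append] at hq
          rcases hq with hq | hq
          · have : bDeg cur q < 4 := hd q (by simp [hq]) (hsub' hq')
            exact lt_of_le_of_lt (bDeg_mono cur' cur hsub' q) this
          · rw [hadds, List.mem_filter] at hq
            have := hq.2
            simp only [Bool.and_eq_true, decide_eq_true_eq] at this
            exact this.2
        -- fuel bookkeeping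
        have haddslen : adds.length ≤ 8 := by
          calc adds.length ≤ (bDirs.map (fun d => (p.1 + d.1, p.2 + d.2))).length :=
                List.length_filter_le _ _
            _ = 8 := by simp [bDirs]
        have hcurlen : cur'.length + 1 = cur.length := by
          rw [hcur', List.length_erase_of_mem hmem]
          have : 0 < cur.length := List.length_pos_of_mem hmem
          omega
        have hfuel' : (s' ++ adds).length + 9 * cur'.length < fuel := by
          rw [List.length_append]
          simp only [List.length_append, List.length_singleton] at hfuel
          omega
        obtain ⟨h1, h2, h3, h4⟩ := ih (s' ++ adds) cur' hnd' hc' hd' hF' hfuel'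
        exact ⟨fun x hx => hsub' (h1 hx), h2, h3, h4⟩
      · simp only [hmem, if_neg, if_false]
        have hc2 : ∀ q ∈ cur, bDeg cur q < 4 → q ∈ s' := by
          intro q hq hdeg
          have := hc q hq hdeg
          rw [List.mem_append, List.mem_singleton] at this
          rcases this with h' | rfl
          · exact h'
          · exact absurd hq hmem
        have hd2 : ∀ q ∈ s', q ∈ cur → bDeg cur q < 4 := by
          intro q hq hq'
          exact hd q (by simp [hq]) hq'
        have hfuel2 : s'.length + 9 * cur.length < fuel := by
          simp only [List.length_append, List.length_singleton] at hfuel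
          omega
        exact ih s' cur hnd hc2 hd2 hF hfuel2

-- ===== VERDICT (by name: the statement is the Claim_ definition above) =====
-- ===== VERDICT (by name: the statement is the Claim_ definition above) =====
set_option maxHeartbeats 800000 in
theorem check_adjacent_new_spec : Claim_equal_check_adjacent_new := by
  intro pallet _ hpre
  obtain ⟨hne, hall⟩ := hpre
  unfold Spec_check_adjacent_new
  simp only [check_adjacent_new, check_adjacent_new_alt, List.length_map]
  have hw0 : 0 ≤ PySem.Str.len (pallet.headD "") := by
    rw [PySem.Str.len_eq]; positivity
  have hrow : ∀ s ∈ pallet, PySem.Str.len (pallet.headD "") ≤ (s.toList.length : Int) := by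
    intro s hs
    have := hall s hs
    rwa [PySem.Str.len_eq s] at this
  have hbl := bLive_eq_liveOf pallet (PySem.Str.len (pallet.headD "")) hw0 hrow
  have hnd : (bLive pallet (PySem.Str.len (pallet.headD ""))).Nodup := by
    rw [hbl]; exact nodup_liveOf _ _ _
  rw [hbl] at hnd ⊢
  rw [dedup_eq_self_of_nodup _ hnd]
  have hndL0 : ((liveOf (pallet.map (fun row => row.toList)) (pallet.length : Int) (PySem.Str.len (pallet.headD "")))).Nodup := nodup_liveOf _ _ _
  have hshp : Shp (pallet.map (fun row => row.toList)) (pallet.length : Int)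
      (PySem.Str.len (pallet.headD "")) := by
    refine ⟨by simp, hw0, ?_⟩
    intro row hr
    rw [List.mem_map] at hr
    obtain ⟨s, hs, rfl⟩ := hr
    exact hrow s hs
  have hbound : ((liveOf (pallet.map (fun row => row.toList)) (pallet.length : Int) (PySem.Str.len (pallet.headD "")))).length
      ≤ (((pallet.length : Int)) * PySem.Str.len (pallet.headD "")).toNat := by
    calc _ ≤ (rowMajor (pallet.length : Int) (PySem.Str.len (pallet.headD ""))).length :=
          List.length_filter_le _ _
      _ = _ := length_rowMajor _ _ (by positivity) hw0
  rw [main_loop (pallet.length : Int) (PySem.Str.len (pallet.headD ""))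
    ((((pallet.length : Int)) * PySem.Str.len (pallet.headD "")).toNat + 1)
    (((liveOf (pallet.map (fun row => row.toList)) (pallet.length : Int) (PySem.Str.len (pallet.headD "")))).length + 1) (pallet.map (fun row => row.toList)) 0 hshp (by omega) (by omega)]
  generalize hE : ((liveOf (pallet.map (fun row => row.toList)) (pallet.length : Int) (PySem.Str.len (pallet.headD "")))) = L0 at hndL0 ⊢
  obtain ⟨hFsub, hFnd, hFdeg, hFmax⟩ := sLoop_spec (L0.length + 1) L0 (by omega) hndL0
  obtain ⟨hRsub, hRnd, hRdeg, hRF⟩ := bQueue_spec (sLoop (L0.length + 1) L0) hFdeg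
    ((L0.filter (fun p => decide (bDeg L0 p < 4))).length + 9 * L0.length + 1)
    (L0.filter (fun p => decide (bDeg L0 p < 4))) L0 hndL0
    (by intro q hq hdeg; rw [List.mem_filter]; exact ⟨hq, by simpa using hdeg⟩)
    (by intro q hq _; rw [List.mem_filter] at hq; simpa using hq.2)
    hFsub (by omega)
  have hRFsub := hFmax _ hRsub hRdeg
  have hperm : List.Perm (bQueue ((L0.filter (fun p => decide (bDeg L0 p < 4))).length
        + 9 * L0.length + 1) (L0.filter (fun p => decide (bDeg L0 p < 4))) L0)
      (sLoop (L0.length + 1) L0) :=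
    (List.perm_ext_iff_of_nodup hRnd hFnd).2
      (fun a => ⟨fun ha => hRFsub ha, fun ha => hRF ha⟩)
  rw [hperm.length_eq]
  omega
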